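-- pv_equiv track=rewrite | github.com/MaBlock7/Gemeindestand_mapper | src/old_code/gmde_matrix.py | create_date_dictionary
-- ===== SOURCE A (Python) =====
-- def create_date_dictionary(date_list):
--     date_dict = {}
--     year_suffix = {}
--
--     for date_str in date_list:
--         date_parts = date_str.split('-')
--         year = date_parts[0]
--
--         if year not in year_suffix:
--             year_suffix[year] = 'a'
--         else:
--             year_suffix[year] = chr(ord(year_suffix[year]) + 1)
--
--         suffix = year_suffix[year]
--         date_dict[date_str] = f"{year[2:4]}_{suffix}"
--
--     return date_dict
-- ===== SOURCE B (Python) =====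
-- def create_date_dictionary(date_list):
--     # Pass 1: group the date strings by their year prefix, preserving order.
--     groups = {}
--     for date_str in date_list:
--         groups.setdefault(date_str.split('-')[0], []).append(date_str)
--     # Pass 2: per year, enumerate its dates; overwrites make the last occurrence win.
--     final = {}
--     for year, dates in groups.items():
--         for i, date_str in enumerate(dates):
--             final[date_str] = f"{year[2:4]}_{chr(ord('a') + i)}"
--     # Rebuild in first-appearance key order.
--     return {date_str: final[date_str] for date_str in date_list}
-- ===== Notes on version B (the rewrite author's own statement) =====
-- stated objective: alternative
-- what changed: A's single pass with a running per-year suffix counter is replaced by a grouping pass (year -> its dates in appearance order) followed by a nested enumeration assigning index-derived suffixes, and a final rebuild in first-appearance key order.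
import Mathlib
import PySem

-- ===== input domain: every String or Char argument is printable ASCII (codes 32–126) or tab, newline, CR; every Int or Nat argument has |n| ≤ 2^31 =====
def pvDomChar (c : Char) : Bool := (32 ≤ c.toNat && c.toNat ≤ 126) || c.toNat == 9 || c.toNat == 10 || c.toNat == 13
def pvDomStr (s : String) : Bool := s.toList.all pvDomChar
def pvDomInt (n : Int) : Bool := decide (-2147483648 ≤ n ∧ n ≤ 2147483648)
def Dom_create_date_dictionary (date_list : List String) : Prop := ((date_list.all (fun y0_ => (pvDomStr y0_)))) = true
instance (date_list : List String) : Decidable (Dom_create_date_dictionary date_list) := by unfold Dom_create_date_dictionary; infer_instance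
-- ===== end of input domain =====

-- B replaces A's single pass with a running per-year suffix counter by a grouping pass (year -> its dates
-- in order) followed by a nested enumeration that assigns each date its index-derived suffix; objective:
-- alternative decomposition, same cost.

-- shared helpers: both Pythons literally compute date_str.split('-')[0] and the f-string f"{year[2:4]}_{suffix}"
def pvYear (date_str : String) : String := ((PySem.Str.split? date_str "-").getD []).headD ""  -- split? is some (sep ≠ ""), split('-') is never [], so [0] is its head
def pvFmt (year : String) (suffix : Char) : String :=
  PySem.Str.slice year (some 2) (some 4) ++ "_" ++ String.singleton suffix

-- ===== PORT A =====
-- the one-char suffix string is kept as its code point (Nat); chr/ord round-trip, exact on chr's range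
def create_date_dictionary (date_list : List String) : List (String × String) :=
  (date_list.foldl
    (fun (st : PySem.Dict String String × PySem.Dict String Nat) date_str =>
      let year := pvYear date_str
      let year_suffix :=
        if st.2.contains year = false then
          st.2.insert year ('a'.toNat)                         -- year_suffix[year] = 'a'
        else
          st.2.insert year (st.2.getD year 0 + 1)              -- year_suffix[year] = chr(ord(...) + 1)
      let suffix := Char.ofNat (year_suffix.getD year 0)
      (st.1.insert date_str (pvFmt year suffix), year_suffix))
    (PySem.Dict.empty, PySem.Dict.empty)).1.items

-- ===== PORT B =====
def create_date_dictionary_alt (date_list : List String) : List (String × String) :=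
  -- pass 1: groups.setdefault(date_str.split('-')[0], []).append(date_str)
  let groups := date_list.foldl
    (fun (g : PySem.Dict String (List String)) date_str =>
      g.modify (pvYear date_str) [] (· ++ [date_str]))
    PySem.Dict.empty
  -- pass 2: for year, dates in groups.items(): for i, d in enumerate(dates): final[d] = f"{year[2:4]}_{chr(ord('a')+i)}"
  let final := groups.items.foldl
    (fun (f : PySem.Dict String String) yd =>
      (PySem.List.enumerate yd.2 0).foldl
        (fun f p => f.insert p.2 (pvFmt yd.1 (Char.ofNat ('a'.toNat + p.1.toNat))))
        f)
    PySem.Dict.empty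
  -- pass 3: {d: final[d] for d in date_list}
  (date_list.foldl
    (fun (r : PySem.Dict String String) date_str => r.insert date_str (final.getD date_str ""))
    PySem.Dict.empty).items

-- ===== PRECONDITION & SPEC =====
def Spec_create_date_dictionary (date_list : List String) (out : List (String × String)) : Prop := out = create_date_dictionary_alt date_list
instance (date_list : List String) (out : List (String × String)) : Decidable (Spec_create_date_dictionary date_list out) := by unfold Spec_create_date_dictionary; infer_instance

-- ===== CLAIM (what is proved, stated in full; the proofs are below) =====
def Claim_equal_create_date_dictionary : Prop := ∀ (date_list : List String), Dom_create_date_dictionary date_list → Spec_create_date_dictionary date_list (create_date_dictionary date_list)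

-- ===== LEMMAS AND PROOFS =====

-- first occurrences of a list, in order (the key order of a dict built over it)
def pvFo : List String → List String
  | [] => []
  | x :: t => x :: (pvFo t).filter (fun e => e ≠ x)

-- index of the LAST occurrence of d in ds
def pvLi (ds : List String) (d : String) : Option Nat :=
  match ds with
  | [] => none
  | x :: t =>
    match pvLi t d with
    | some j => some (j + 1)
    | none => if x = d then some 0 else none

def pvGr (l : List String) (y : String) : List String := l.filter (fun e => pvYear e == y)
def pvCnt (l : List String) (y : String) : Nat := l.countP (fun e => pvYear e == y)
def pvVal (y : String) (n : Nat) : String := pvFmt y (Char.ofNat n)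
def pvV (l : List String) (d : String) : String :=
  pvVal (pvYear d) ('a'.toNat + (pvLi (pvGr l (pvYear d)) d).getD 0)
def pvR (l : List String) : List (String × String) := (pvFo l).map (fun d => (d, pvV l d))

theorem mem_pvFo (l : List String) (d : String) : d ∈ pvFo l ↔ d ∈ l := by
  induction l with
  | nil => simp [pvFo]
  | cons x t ih =>
    by_cases h : d = x <;> simp [pvFo, List.mem_filter, h, ih]

theorem pvFo_append (l : List String) (x : String) :
    pvFo (l ++ [x]) = if x ∈ l then pvFo l else pvFo l ++ [x] := by
  induction l with
  | nil => simp [pvFo]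
  | cons a t ih =>
    by_cases hx : x ∈ t
    · simp [pvFo, List.cons_append, ih, hx, List.mem_cons]
    · by_cases hax : x = a
      · subst hax
        simp [pvFo, List.cons_append, ih, hx, List.filter_append, pvFo]
      · have hmem : ¬ x ∈ a :: t := by simp [List.mem_cons, hax, hx]
        simp only [List.cons_append, pvFo, ih, hx, if_false, if_neg hmem, List.filter_append]
        simp [pvFo, hax]

theorem pvLi_append (ds : List String) (e d : String) :
    pvLi (ds ++ [e]) d = if e = d then some ds.length else pvLi ds d := by
  induction ds with
  | nil => simp [pvLi]
  | cons x t ih =>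
    simp only [List.cons_append, pvLi, ih]
    by_cases h : e = d
    · simp [h]
    · simp [h]

theorem pvLi_isSome_iff (ds : List String) (d : String) : (pvLi ds d).isSome = true ↔ d ∈ ds := by
  induction ds with
  | nil => simp [pvLi]
  | cons x t ih =>
    cases h : pvLi t d with
    | some j => simp [pvLi, h, ← ih]
    | none =>
      by_cases hx : x = d
      · simp [pvLi, h, hx, ← ih]
      · simp [pvLi, h, hx, ← ih]
        exact fun hh => hx hh.symm

theorem mem_pvGr (l : List String) (y d : String) : d ∈ pvGr l y ↔ d ∈ l ∧ pvYear d = y := by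
  simp [pvGr, List.mem_filter]

-- the inner enumerate loop of port B, characterised by the last-occurrence index
theorem pvInnerE (y : String) (ds : List String) : ∀ (s : Nat) (f : PySem.Dict String String) (d' : String),
    ((PySem.List.enumerate ds (s : Int)).foldl
        (fun f p => f.insert p.2 (pvFmt y (Char.ofNat ('a'.toNat + p.1.toNat)))) f).get? d'
      = match pvLi ds d' with
        | some j => some (pvVal y ('a'.toNat + (s + j)))
        | none => f.get? d' := by
  induction ds with
  | nil => intro s f d'; simp [PySem.List.enumerate_nil, pvLi]
  | cons x t ih =>
    intro s f d'
    rw [PySem.List.enumerate_cons]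
    simp only [List.foldl_cons]
    have hs : ((s : Int) + 1) = ((s + 1 : Nat) : Int) := by push_cast; ring
    rw [hs, ih (s + 1)]
    cases h : pvLi t d' with
    | some j =>
      simp only [pvLi, h]
      have : 'a'.toNat + (s + 1 + j) = 'a'.toNat + (s + (j + 1)) := by omega
      rw [this]
    | none =>
      simp only [pvLi, h]
      rw [PySem.Dict.get?_insert]
      by_cases hx : d' = x
      · subst hx
        simp [pvVal]
      · have hxx : ¬ x = d' := fun hh => hx hh.symm
        simp [hx, hxx]

theorem pvInnerE0 (y : String) (ds : List String) (f : PySem.Dict String String) (d' : String) :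
    ((PySem.List.enumerate ds (0 : Int)).foldl
        (fun f p => f.insert p.2 (pvFmt y (Char.ofNat ('a'.toNat + p.1.toNat)))) f).get? d'
      = match pvLi ds d' with
        | some j => some (pvVal y ('a'.toNat + j))
        | none => f.get? d' := by
  have h := pvInnerE y ds 0 f d'
  simp only [Nat.cast_zero, Nat.zero_add] at h
  exact h

theorem pvLi_mem_some (ds : List String) (d : String) (h : d ∈ ds) : ∃ j, pvLi ds d = some j := by
  have := (pvLi_isSome_iff ds d).2 h
  exact Option.isSome_iff_exists.1 this

-- the outer loop of port B over the grouped years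
theorem pvOuterO (l : List String) : ∀ (ys : List String) (f : PySem.Dict String String) (d' : String),
    (ys.foldl
        (fun f y => ((PySem.List.enumerate (pvGr l y) (0 : Int)).foldl
          (fun f p => f.insert p.2 (pvFmt y (Char.ofNat ('a'.toNat + p.1.toNat)))) f)) f).get? d'
      = if pvYear d' ∈ ys ∧ d' ∈ l then some (pvV l d') else f.get? d' := by
  intro ys
  induction ys with
  | nil => intro f d'; simp
  | cons y t ih =>
    intro f d'
    simp only [List.foldl_cons]
    rw [ih]
    by_cases hct : pvYear d' ∈ t ∧ d' ∈ l
    · rw [if_pos hct, if_pos ⟨List.mem_cons_of_mem y hct.1, hct.2⟩]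
    · rw [if_neg hct, pvInnerE0]
      cases h : pvLi (pvGr l y) d' with
      | some j =>
        have hmem : d' ∈ pvGr l y := (pvLi_isSome_iff _ _).1 (by simp [h])
        obtain ⟨hdl, hyd⟩ := (mem_pvGr l y d').1 hmem
        have hcond : pvYear d' ∈ y :: t ∧ d' ∈ l := ⟨by simp [hyd], hdl⟩
        rw [if_pos hcond]
        simp only [pvV, hyd, h, Option.getD_some]
      | none =>
        have hnm : ¬ d' ∈ pvGr l y := by
          intro hm
          obtain ⟨j, hj⟩ := pvLi_mem_some _ _ hm
          simp [hj] at h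
        have hcond : ¬ (pvYear d' ∈ y :: t ∧ d' ∈ l) := by
          rintro ⟨hy, hdl⟩
          rcases List.mem_cons.1 hy with hy1 | hy2
          · exact hnm ((mem_pvGr l y d').2 ⟨hdl, hy1⟩)
          · exact hct ⟨hy2, hdl⟩
        rw [if_neg hcond]

-- pass 1 of port B: the grouping dict, characterised
theorem pvGroups_items (l : List String) :
    (l.foldl (fun (g : PySem.Dict String (List String)) date_str =>
        g.modify (pvYear date_str) [] (· ++ [date_str])) PySem.Dict.empty).items
      = (PySem.Set.ofList (l.map pvYear)).map (fun y => (y, pvGr l y)) := by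
  have hkeys : (l.foldl (fun (g : PySem.Dict String (List String)) date_str =>
      g.modify (pvYear date_str) [] (· ++ [date_str])) PySem.Dict.empty).keys
      = PySem.Set.ofList (l.map pvYear) := by
    rw [PySem.Dict.keys_foldl_modify_key l pvYear [] (fun _ d => (· ++ [d]))]
    rw [PySem.Dict.keys_empty]
    exact PySem.Set.update_empty _
  have hnodup : (l.foldl (fun (g : PySem.Dict String (List String)) date_str =>
      g.modify (pvYear date_str) [] (· ++ [date_str])) PySem.Dict.empty).keys.Nodup :=
    PySem.Dict.nodup_keys_foldl_modify_key l pvYear []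
      (fun _ d => (· ++ [d])) PySem.Dict.empty PySem.Dict.nodup_keys_empty
  have hget : ∀ y, (l.foldl (fun (g : PySem.Dict String (List String)) date_str =>
      g.modify (pvYear date_str) [] (· ++ [date_str])) PySem.Dict.empty).getD y [] = pvGr l y := by
    intro y
    have hm : (l.map (fun d => (pvYear d, d))).foldl
        (fun (g : PySem.Dict String (List String)) p => g.modify p.1 [] (· ++ [p.2])) PySem.Dict.empty
        = l.foldl (fun (g : PySem.Dict String (List String)) date_str =>
            g.modify (pvYear date_str) [] (· ++ [date_str])) PySem.Dict.empty := by
      rw [List.foldl_map]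
    rw [← hm, PySem.Dict.getD_foldl_modify_append]
    simp only [List.filter_map, List.map_map]
    have : PySem.Dict.empty.getD y ([] : List String) = [] := by
      rw [PySem.Dict.getD_eq_get?_getD, PySem.Dict.get?_empty]; rfl
    rw [this]
    simp [pvGr, Function.comp_def]
  rw [PySem.Dict.items_eq_map_keys _ hnodup [], hkeys]
  exact List.map_congr_left (fun y _ => by rw [hget y])

-- a dict built from scratch by inserting a per-key value: items = first occurrences, mapped
theorem pvFoldlInsertItems (w : String → String) (m : List String) :
    (m.foldl (fun (r : PySem.Dict String String) d => r.insert d (w d)) PySem.Dict.empty).items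
      = (pvFo m).map (fun d => (d, w d)) := by
  induction m using List.reverseRecOn with
  | nil => simp [pvFo]; rfl
  | append_singleton m x ih =>
    rw [List.foldl_append]
    simp only [List.foldl_cons, List.foldl_nil]
    have hkeys : (m.foldl (fun (r : PySem.Dict String String) d => r.insert d (w d))
        PySem.Dict.empty).keys = PySem.Set.ofList m := by
      rw [PySem.Dict.keys_foldl_insert m (fun _ d => w d), PySem.Dict.keys_empty]
      exact PySem.Set.update_empty _
    by_cases hx : x ∈ m
    · have hc : (m.foldl (fun (r : PySem.Dict String String) d => r.insert d (w d))
          PySem.Dict.empty).contains x = true := by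
        rw [PySem.Dict.contains_iff_mem_keys, hkeys, PySem.Set.mem_ofList]; exact hx
      rw [PySem.Dict.items_insert_of_contains _ _ hc, ih, pvFo_append, if_pos hx, List.map_map]
      apply List.map_congr_left
      intro d _
      by_cases hdx : d = x <;> simp [hdx]
    · have hc : (m.foldl (fun (r : PySem.Dict String String) d => r.insert d (w d))
          PySem.Dict.empty).contains x = false := by
        rw [Bool.eq_false_iff]
        intro hh
        exact hx (PySem.Set.mem_ofList m x |>.1 (hkeys ▸ (PySem.Dict.contains_iff_mem_keys _ x).1 hh))
      rw [PySem.Dict.items_insert_of_not_contains _ _ hc, ih, pvFo_append, if_neg hx, List.map_append]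
      rfl

-- the port-A loop body, named for the proofs (definitionally the lambda in create_date_dictionary)
def pvAstep (st : PySem.Dict String String × PySem.Dict String Nat) (date_str : String) :
    PySem.Dict String String × PySem.Dict String Nat :=
  let year := pvYear date_str
  let year_suffix :=
    if st.2.contains year = false then
      st.2.insert year ('a'.toNat)
    else
      st.2.insert year (st.2.getD year 0 + 1)
  let suffix := Char.ofNat (year_suffix.getD year 0)
  (st.1.insert date_str (pvFmt year suffix), year_suffix)

theorem create_date_dictionary_eq (l : List String) :
    create_date_dictionary l = (l.foldl pvAstep (PySem.Dict.empty, PySem.Dict.empty)).1.items := rfl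

theorem pvCnt_append (l : List String) (x : String) (y : String) :
    pvCnt (l ++ [x]) y = pvCnt l y + (if pvYear x = y then 1 else 0) := by
  simp only [pvCnt, List.countP_append, List.countP_cons, List.countP_nil]
  by_cases h : pvYear x = y <;> simp [h]

theorem pvGr_append (l : List String) (x : String) (y : String) :
    pvGr (l ++ [x]) y = pvGr l y ++ (if pvYear x = y then [x] else []) := by
  simp only [pvGr, List.filter_append]
  by_cases h : pvYear x = y <;> simp [h]

theorem pvV_append_self (l : List String) (x : String) :
    pvV (l ++ [x]) x = pvVal (pvYear x) ('a'.toNat + pvCnt l (pvYear x)) := by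
  have hg : pvGr (l ++ [x]) (pvYear x) = pvGr l (pvYear x) ++ [x] := by
    rw [pvGr_append, if_pos rfl]
  have h : (pvGr l (pvYear x)).length = pvCnt l (pvYear x) := by
    rw [pvCnt, List.countP_eq_length_filter]; rfl
  simp only [pvV]
  rw [hg, pvLi_append, if_pos rfl, Option.getD_some, h]

theorem pvV_append_ne (l : List String) (x d : String) (hdx : d ≠ x) :
    pvV (l ++ [x]) d = pvV l d := by
  simp only [pvV, pvGr_append]
  by_cases h : pvYear x = pvYear d
  · rw [if_pos h, pvLi_append, if_neg (fun hh => hdx hh.symm)]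
  · rw [if_neg h, List.append_nil]

-- port A's loop invariant: the suffix dict holds 96 + (count of the year so far),
-- the result dict's items are the first occurrences paired with the canonical value
theorem pvA_inv (l : List String) :
    (∀ y, (l.foldl pvAstep (PySem.Dict.empty, PySem.Dict.empty)).2.get? y
        = if pvCnt l y = 0 then none else some ('a'.toNat - 1 + pvCnt l y))
    ∧ (l.foldl pvAstep (PySem.Dict.empty, PySem.Dict.empty)).1.items = pvR l := by
  induction l using List.reverseRecOn with
  | nil =>
    constructor
    · intro y; simp [pvCnt, PySem.Dict.get?_empty]
    · simp [pvR, pvFo]; rfl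
  | append_singleton l x ih =>
    obtain ⟨iha, ihb⟩ := ih
    rw [List.foldl_append] at *
    simp only [List.foldl_cons, List.foldl_nil]
    set st := l.foldl pvAstep (PySem.Dict.empty, PySem.Dict.empty) with hst
    set c := pvCnt l (pvYear x) with hc
    have ha : 'a'.toNat = 97 := rfl
    have hys : (pvAstep st x).2 = st.2.insert (pvYear x) ('a'.toNat - 1 + (c + 1)) := by
      simp only [pvAstep]
      rw [PySem.Dict.contains_eq_isSome_get?, iha (pvYear x), ← hc]
      by_cases h0 : c = 0
      · rw [if_pos h0]
        rw [if_pos (by simp)]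
        congr 1
        rw [ha, h0]
      · rw [if_neg h0]
        rw [if_neg (by simp)]
        rw [PySem.Dict.getD_eq_get?_getD, iha (pvYear x), ← hc, if_neg h0, Option.getD_some]
        congr 1
    have hdd : (pvAstep st x).1 = st.1.insert x (pvVal (pvYear x) ('a'.toNat + c)) := by
      simp only [pvAstep] at hys ⊢
      rw [show (if st.2.contains (pvYear x) = false then st.2.insert (pvYear x) ('a'.toNat)
            else st.2.insert (pvYear x) (st.2.getD (pvYear x) 0 + 1))
          = st.2.insert (pvYear x) ('a'.toNat - 1 + (c + 1)) from hys]
      rw [PySem.Dict.getD_insert_self]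
      have : 'a'.toNat - 1 + (c + 1) = 'a'.toNat + c := by rw [ha]; omega
      rw [this]
      rfl
    constructor
    · intro y
      rw [hys, PySem.Dict.get?_insert]
      by_cases hy : y = pvYear x
      · subst hy
        rw [if_pos rfl, pvCnt_append, if_pos rfl, ← hc, if_neg (by omega)]
      · have hxy : (if pvYear x = y then (1 : Nat) else 0) = 0 := if_neg (fun hh => hy hh.symm)
        rw [if_neg hy, pvCnt_append, hxy, Nat.add_zero, iha y]
    · rw [hdd]
      have hkeys : st.1.keys = pvFo l := by
        show st.1.items.map (fun p => p.1) = pvFo l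
        rw [ihb, pvR, List.map_map]
        simp [Function.comp_def]
      by_cases hx : x ∈ l
      · have hcont : st.1.contains x = true := by
          rw [PySem.Dict.contains_iff_mem_keys, hkeys, mem_pvFo]; exact hx
        rw [PySem.Dict.items_insert_of_contains _ _ hcont, ihb, pvR, pvR, pvFo_append,
          if_pos hx, List.map_map]
        apply List.map_congr_left
        intro d _
        by_cases hdx : d = x
        · subst hdx
          simp [pvV_append_self, hc]
        · simp only [Function.comp_apply]
          rw [if_neg (by simp [hdx]), pvV_append_ne l x d hdx]
      · have hcont : st.1.contains x = false := by
          rw [Bool.eq_false_iff]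
          intro hh
          exact hx ((mem_pvFo l x).1 (hkeys ▸ (PySem.Dict.contains_iff_mem_keys _ x).1 hh))
        rw [PySem.Dict.items_insert_of_not_contains _ _ hcont, ihb]
        simp only [pvR]
        rw [pvFo_append, if_neg hx, List.map_append]
        have hmap : (pvFo l).map (fun d => (d, pvV (l ++ [x]) d))
            = (pvFo l).map (fun d => (d, pvV l d)) := by
          apply List.map_congr_left
          intro d hd
          have hdx : d ≠ x := fun hh => hx (hh ▸ (mem_pvFo l d).1 hd)
          rw [pvV_append_ne l x d hdx]
        rw [hmap, List.map_singleton, pvV_append_self, ← hc]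

-- port B's `final` dict, characterised: lookup = the canonical value iff the date occurs
theorem pvB_final_get? (l : List String) (d' : String) :
    (((l.foldl (fun (g : PySem.Dict String (List String)) date_str =>
          g.modify (pvYear date_str) [] (· ++ [date_str])) PySem.Dict.empty).items).foldl
      (fun (f : PySem.Dict String String) yd =>
        (PySem.List.enumerate yd.2 0).foldl
          (fun f p => f.insert p.2 (pvFmt yd.1 (Char.ofNat ('a'.toNat + p.1.toNat)))) f)
      PySem.Dict.empty).get? d'
    = if d' ∈ l then some (pvV l d') else none := by
  rw [pvGroups_items, List.foldl_map]
  have h := pvOuterO l (PySem.Set.ofList (l.map pvYear)) PySem.Dict.empty d'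
  simp only at h
  rw [h]
  by_cases hd : d' ∈ l
  · have hy : pvYear d' ∈ PySem.Set.ofList (l.map pvYear) := by
      rw [PySem.Set.mem_ofList]
      exact List.mem_map_of_mem hd
    rw [if_pos ⟨hy, hd⟩, if_pos hd]
  · rw [if_neg (fun hh => hd hh.2), if_neg hd, PySem.Dict.get?_empty]

theorem pvB_eq (l : List String) : create_date_dictionary_alt l = pvR l := by
  show (l.foldl (fun (r : PySem.Dict String String) date_str =>
      r.insert date_str
        ((((l.foldl (fun (g : PySem.Dict String (List String)) date_str =>
              g.modify (pvYear date_str) [] (· ++ [date_str])) PySem.Dict.empty).items).foldl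
          (fun (f : PySem.Dict String String) yd =>
            (PySem.List.enumerate yd.2 0).foldl
              (fun f p => f.insert p.2 (pvFmt yd.1 (Char.ofNat ('a'.toNat + p.1.toNat)))) f)
          PySem.Dict.empty).getD date_str ""))
      PySem.Dict.empty).items = pvR l
  rw [pvFoldlInsertItems]
  apply List.map_congr_left
  intro d hd
  have hdl : d ∈ l := (mem_pvFo l d).1 hd
  rw [PySem.Dict.getD_eq_get?_getD, pvB_final_get?, if_pos hdl]
  rfl

-- ===== VERDICT (by name: the statement is the Claim_ definition above) =====
theorem create_date_dictionary_spec : Claim_equal_create_date_dictionary := by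
  intro l _
  unfold Spec_create_date_dictionary
  rw [create_date_dictionary_eq, (pvA_inv l).2, pvB_eq]
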